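-- pv_equiv track=rewrite | github.com/zazabap/problem-reductions | docs/paper/verify-reductions/adversary_partition_open_shop_scheduling.py | build_feasible_schedule
-- ===== SOURCE A (Python) =====
-- def build_feasible_schedule(sizes, I1_indices, I2_indices, Q):
--     """
--     Build schedule using rotated assignment from Typst proof.
--
--     Special job on M1:[0,Q), M2:[Q,2Q), M3:[2Q,3Q)
--     I1 jobs: M1:[Q+c, Q+c+a), M2:[2Q+c, 2Q+c+a), M3:[c, c+a)
--     I2 jobs: M1:[2Q+c, 2Q+c+a), M2:[c, c+a), M3:[Q+c, Q+c+a)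
--     """
--     k = len(sizes)
--     sched = []
--
--     # Special job
--     sched.append((k, 0, 0, Q))
--     sched.append((k, 1, Q, 2 * Q))
--     sched.append((k, 2, 2 * Q, 3 * Q))
--
--     c = 0
--     for j in I1_indices:
--         a = sizes[j]
--         sched.append((j, 0, Q + c, Q + c + a))
--         sched.append((j, 1, 2 * Q + c, 2 * Q + c + a))
--         sched.append((j, 2, c, c + a))
--         c += a
--
--     c = 0
--     for j in I2_indices:
--         a = sizes[j]
--         sched.append((j, 0, 2 * Q + c, 2 * Q + c + a))
--         sched.append((j, 1, c, c + a))
--         sched.append((j, 2, Q + c, Q + c + a))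
--         c += a
--
--     return sched
-- ===== SOURCE B (Python) =====
-- def build_feasible_schedule(sizes, I1_indices, I2_indices, Q):
--     """Uniform rotation formulation: every job (including the special one) emits
--     its three intervals by one formula, start = ((m + r) % 3) * Q + offset, where
--     r is the group's machine rotation (special r=0, I1 r=1, I2 r=2); groups are
--     expanded recursively rather than by an accumulator loop.  Correct because the
--     hard-coded I1 pattern (Q+c, 2Q+c, c) is exactly the rotation m -> (m+1) % 3 of
--     the Q-multiples and the I2 pattern is the rotation m -> (m+2) % 3."""
--     def rows(job, r, c, a):
--         return [(job, m, ((m + r) % 3) * Q + c, ((m + r) % 3) * Q + c + a)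
--                 for m in range(3)]
--
--     def group(idxs, r, c=0):
--         if not idxs:
--             return []
--         j = idxs[0]
--         return rows(j, r, c, sizes[j]) + group(idxs[1:], r, c + sizes[j])
--
--     return rows(len(sizes), 0, 0, Q) + group(I1_indices, 1) + group(I2_indices, 2)
-- ===== Notes on version B (the rewrite author's own statement) =====
-- stated objective: alternative
-- what changed: Replaces A's three hard-coded emission patterns and accumulator loops by one uniform rotation formula start=((m+r)%3)*Q+offset covering the special job and both groups (r=0,1,2), with groups expanded by recursion on the index list instead of a running-c loop.
import Mathlib
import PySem

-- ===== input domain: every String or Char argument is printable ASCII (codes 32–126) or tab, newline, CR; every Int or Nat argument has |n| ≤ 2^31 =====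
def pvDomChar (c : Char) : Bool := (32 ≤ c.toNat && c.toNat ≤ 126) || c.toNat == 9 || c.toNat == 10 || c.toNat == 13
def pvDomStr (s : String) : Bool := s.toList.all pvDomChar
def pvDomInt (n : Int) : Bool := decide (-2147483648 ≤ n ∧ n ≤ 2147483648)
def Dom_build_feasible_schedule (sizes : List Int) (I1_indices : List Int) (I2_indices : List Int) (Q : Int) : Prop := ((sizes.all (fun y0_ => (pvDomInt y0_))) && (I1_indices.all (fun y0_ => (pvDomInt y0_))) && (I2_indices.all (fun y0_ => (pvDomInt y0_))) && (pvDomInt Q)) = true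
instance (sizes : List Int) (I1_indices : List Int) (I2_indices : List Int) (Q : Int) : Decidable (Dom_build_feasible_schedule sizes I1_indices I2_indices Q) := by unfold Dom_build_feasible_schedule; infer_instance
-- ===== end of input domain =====

-- B replaces A's three hard-coded interval patterns and accumulator loops by one
-- uniform machine-rotation formula ((m+r)%3)*Q+offset with recursive group expansion.
-- Pre_ excludes only inputs where sizes[j] raises IndexError in both programs.

-- ===== PORT A =====
-- A's `sizes[j]` is PySem.List.pyGet?; Pre_ guarantees it is `some`, `.getD 0` discharges the option.
def build_feasible_schedule (sizes : List Int) (I1_indices : List Int) (I2_indices : List Int) (Q : Int) : List (Int × Int × Int × Int) :=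
  let k : Int := sizes.length
  let sched : List (Int × Int × Int × Int) :=
    [(k, 0, 0, Q), (k, 1, Q, 2 * Q), (k, 2, 2 * Q, 3 * Q)]
  let s1 := I1_indices.foldl (fun (st : List (Int × Int × Int × Int) × Int) j =>
      let a := (PySem.List.pyGet? sizes j).getD 0
      let c := st.2
      (st.1 ++ [(j, 0, Q + c, Q + c + a), (j, 1, 2 * Q + c, 2 * Q + c + a), (j, 2, c, c + a)], c + a))
    (sched, 0)
  let s2 := I2_indices.foldl (fun (st : List (Int × Int × Int × Int) × Int) j =>
      let a := (PySem.List.pyGet? sizes j).getD 0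
      let c := st.2
      (st.1 ++ [(j, 0, 2 * Q + c, 2 * Q + c + a), (j, 1, c, c + a), (j, 2, Q + c, Q + c + a)], c + a))
    (s1.1, 0)
  s2.1

-- ===== PORT B =====
-- Source B's `rows`: one tuple per machine m, start = ((m + r) % 3) * Q + c  (Python % = PySem.Int.mod)
def pvRows (Q job r c a : Int) : List (Int × Int × Int × Int) :=
  (List.range 3).map (fun m =>
    (job, (m : Int), (PySem.Int.mod ((m : Int) + r) 3) * Q + c,
     (PySem.Int.mod ((m : Int) + r) 3) * Q + c + a))

-- Source B's `group`: recursion on the index list, offset carried as parameter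
def pvGroup (sizes : List Int) (Q r : Int) : List Int → Int → List (Int × Int × Int × Int)
  | [], _ => []
  | j :: t, c =>
      let a := (PySem.List.pyGet? sizes j).getD 0
      pvRows Q j r c a ++ pvGroup sizes Q r t (c + a)

def build_feasible_schedule_alt (sizes : List Int) (I1_indices : List Int) (I2_indices : List Int) (Q : Int) : List (Int × Int × Int × Int) :=
  pvRows Q (sizes.length : Int) 0 0 Q ++ pvGroup sizes Q 1 I1_indices 0 ++ pvGroup sizes Q 2 I2_indices 0

-- ===== PRECONDITION & SPEC =====
-- Pre_ excludes exactly the inputs where some index j is out of Python's range for sizes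
-- (j < -len(sizes) or j >= len(sizes)), on which A raises IndexError.
def Pre_build_feasible_schedule (sizes : List Int) (I1_indices : List Int) (I2_indices : List Int) (Q : Int) : Prop :=
  ∀ j ∈ I1_indices ++ I2_indices, -(sizes.length : Int) ≤ j ∧ j < (sizes.length : Int)
instance (sizes : List Int) (I1_indices : List Int) (I2_indices : List Int) (Q : Int) : Decidable (Pre_build_feasible_schedule sizes I1_indices I2_indices Q) := by unfold Pre_build_feasible_schedule; infer_instance
def pvWitness_build_feasible_schedule : List Int × List Int × List Int × Int := ([2, 3], [0], [-1], 5)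

def Spec_build_feasible_schedule (sizes : List Int) (I1_indices : List Int) (I2_indices : List Int) (Q : Int) (out : List (Int × Int × Int × Int)) : Prop := out = build_feasible_schedule_alt sizes I1_indices I2_indices Q
instance (sizes : List Int) (I1_indices : List Int) (I2_indices : List Int) (Q : Int) (out : List (Int × Int × Int × Int)) : Decidable (Spec_build_feasible_schedule sizes I1_indices I2_indices Q out) := by unfold Spec_build_feasible_schedule; infer_instance

-- ===== CLAIM (what is proved, stated in full; the proofs are below) =====
def Claim_equal_build_feasible_schedule : Prop := ∀ (sizes : List Int) (I1_indices : List Int) (I2_indices : List Int) (Q : Int), Dom_build_feasible_schedule sizes I1_indices I2_indices Q → Pre_build_feasible_schedule sizes I1_indices I2_indices Q → Spec_build_feasible_schedule sizes I1_indices I2_indices Q (build_feasible_schedule sizes I1_indices I2_indices Q)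

-- ===== LEMMAS AND PROOFS =====

theorem pvRows_zero (Q k : Int) :
    pvRows Q k 0 0 Q = [(k, 0, 0, Q), (k, 1, Q, 2 * Q), (k, 2, 2 * Q, 3 * Q)] := by
  simp [pvRows, List.range_succ, PySem.Int.mod]
  constructor <;> ring

theorem pvRows_one (Q j c a : Int) :
    pvRows Q j 1 c a = [(j, 0, Q + c, Q + c + a), (j, 1, 2 * Q + c, 2 * Q + c + a), (j, 2, c, c + a)] := by
  simp [pvRows, List.range_succ, PySem.Int.mod]

theorem pvRows_two (Q j c a : Int) :
    pvRows Q j 2 c a = [(j, 0, 2 * Q + c, 2 * Q + c + a), (j, 1, c, c + a), (j, 2, Q + c, Q + c + a)] := by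
  simp [pvRows, List.range_succ, PySem.Int.mod]

theorem loop1_eq (sizes : List Int) (Q : Int) (idxs : List Int) :
    ∀ (acc : List (Int × Int × Int × Int)) (c : Int),
      (idxs.foldl (fun (st : List (Int × Int × Int × Int) × Int) j =>
          let a := (PySem.List.pyGet? sizes j).getD 0
          let c := st.2
          (st.1 ++ [(j, 0, Q + c, Q + c + a), (j, 1, 2 * Q + c, 2 * Q + c + a), (j, 2, c, c + a)], c + a))
        (acc, c)).1
        = acc ++ pvGroup sizes Q 1 idxs c := by
  induction idxs with
  | nil => intro acc c; simp [pvGroup]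
  | cons j t ih =>
      intro acc c
      simp only [List.foldl_cons, pvGroup, pvRows_one]
      rw [ih]
      simp

theorem loop2_eq (sizes : List Int) (Q : Int) (idxs : List Int) :
    ∀ (acc : List (Int × Int × Int × Int)) (c : Int),
      (idxs.foldl (fun (st : List (Int × Int × Int × Int) × Int) j =>
          let a := (PySem.List.pyGet? sizes j).getD 0
          let c := st.2
          (st.1 ++ [(j, 0, 2 * Q + c, 2 * Q + c + a), (j, 1, c, c + a), (j, 2, Q + c, Q + c + a)], c + a))
        (acc, c)).1
        = acc ++ pvGroup sizes Q 2 idxs c := by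
  induction idxs with
  | nil => intro acc c; simp [pvGroup]
  | cons j t ih =>
      intro acc c
      simp only [List.foldl_cons, pvGroup, pvRows_two]
      rw [ih]
      simp

-- ===== VERDICT (by name: the statement is the Claim_ definition above) =====
theorem build_feasible_schedule_spec : Claim_equal_build_feasible_schedule := by
  intro sizes I1 I2 Q _ _
  unfold Spec_build_feasible_schedule build_feasible_schedule build_feasible_schedule_alt
  simp only []
  rw [loop2_eq, loop1_eq, pvRows_zero]
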